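-- pv_equiv track=rewrite | github.com/pypi-data/pypi-mirror-349 | packages/pycmd2/pycmd2-0.3.7.tar.gz/pycmd2-0.3.7/src/pycmd2/files/file_level.py | remove_marks
-- ===== SOURCE A (Python) =====
-- import typing
--
-- BRACKET_PAIRS = (" (（[【_-", " )）]】_-")
--
-- def remove_marks(
--     filename: str,
--     marks: typing.Tuple[str, ...],
-- ) -> str:
--     for mark in marks:
--         pos = filename.find(mark)
--         if pos != -1:
--             b, e = pos - 1, pos + len(mark)
--             if b >= 0 and e <= len(filename) - 1:
--                 if (
--                     filename[b] not in BRACKET_PAIRS[0]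
--                     or filename[e] not in BRACKET_PAIRS[1]
--                 ):
--                     return filename[:e] + remove_marks(filename[e:], marks)
--                 filename = filename.replace(filename[b : e + 1], "")
--                 return remove_marks(filename, marks)
--     return filename
-- ===== SOURCE B (Python) =====
-- BRACKET_PAIRS = (" (（[【_-", " )）]】_-")
--
--
-- def remove_marks(filename, marks):
--     # Iterative rewrite: a while-loop with a prefix accumulator instead of recursion.
--     result = ""
--     while True:
--         action = None
--         for mark in marks:
--             pos = filename.find(mark)
--             if pos == -1:
--                 continue
--             b, e = pos - 1, pos + len(mark)
--             if b < 0 or e > len(filename) - 1: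
--                 continue
--             if filename[b] not in BRACKET_PAIRS[0] or filename[e] not in BRACKET_PAIRS[1]:
--                 action = ("cut", e)
--             else:
--                 action = ("strip", filename[b:e + 1])
--             break
--         if action is None:
--             return result + filename
--         if action[0] == "cut":
--             result += filename[:action[1]]
--             filename = filename[action[1]:]
--         else:
--             filename = filename.replace(action[1], "")
-- ===== Notes on version B (the rewrite author's own statement) =====
-- stated objective: simpler
-- what changed: Replaced A's self-recursion (which restarts itself on a suffix or on the stripped string) by a single while-loop with a prefix accumulator `result` and an inner scan that selects one action (cut or strip) per pass.
import Mathlib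
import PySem

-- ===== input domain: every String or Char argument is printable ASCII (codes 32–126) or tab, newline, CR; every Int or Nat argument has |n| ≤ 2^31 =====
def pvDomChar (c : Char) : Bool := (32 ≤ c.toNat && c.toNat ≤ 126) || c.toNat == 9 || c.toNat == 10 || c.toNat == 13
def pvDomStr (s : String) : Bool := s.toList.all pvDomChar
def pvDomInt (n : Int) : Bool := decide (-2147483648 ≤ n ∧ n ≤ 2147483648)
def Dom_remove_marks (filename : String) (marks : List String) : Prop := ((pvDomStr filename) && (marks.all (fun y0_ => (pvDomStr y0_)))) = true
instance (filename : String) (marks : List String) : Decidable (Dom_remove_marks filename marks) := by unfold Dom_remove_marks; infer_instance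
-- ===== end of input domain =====

-- B replaces A's recursion by a while-loop with a prefix accumulator and a scan that
-- reports one action per pass (objective: simpler control flow, no recursion depth limit;
-- same asymptotic cost).

-- ===== PORT A =====
-- BRACKET_PAIRS[0] / BRACKET_PAIRS[1] as lists of code points
def pvOpeners : List Char := " (（[【_-".toList
def pvClosers : List Char := " )）]】_-".toList

-- fuel: each recursive call of A strictly shortens the string, so fuel = length + 1
-- never runs out (a totality guard only, not a change of algorithm).
mutual
  -- body of one call of A (the `for mark in marks` loop with its early returns)
  def pvScanA (fuel : Nat) (s : List Char) (marks : List (List Char)) :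
      List (List Char) → List Char
    | [] => s
    | mark :: ms =>
      let pos := PySem.Chars.find s mark
      if pos ≠ -1 then
        let b := pos - 1
        let e := pos + (mark.length : Int)
        if b ≥ 0 ∧ e ≤ (s.length : Int) - 1 then
          -- b and e are in range here, so pyGet? is some; getD is a totality guard only
          if ¬ pvOpeners.contains ((PySem.List.pyGet? s b).getD ' ')
              ∨ ¬ pvClosers.contains ((PySem.List.pyGet? s e).getD ' ') then
            PySem.List.slice s none (some e) ++ pvGoA fuel (PySem.List.slice s (some e) none) marks
          else
            pvGoA fuel (PySem.Chars.replace s (PySem.List.slice s (some b) (some (e + 1))) []) marks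
        else pvScanA fuel s marks ms
      else pvScanA fuel s marks ms
  termination_by rest => (fuel, rest.length + 1)

  def pvGoA : Nat → List Char → List (List Char) → List Char
    | 0, s, _ => s
    | fuel + 1, s, marks => pvScanA fuel s marks marks
  termination_by fuel _ _ => (fuel, 0)
end

def remove_marks (filename : String) (marks : List String) : String :=
  String.ofList (pvGoA (filename.toList.length + 1) filename.toList (marks.map String.toList))

-- ===== PORT B =====
-- the one action B's inner for-loop selects, if any
inductive PvAct where
  | cut : Int → PvAct
  | strip : List Char → PvAct
deriving DecidableEq, Repr

-- B's inner for-loop: find the first actionable mark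
def pvScanB (s : List Char) : List (List Char) → Option PvAct
  | [] => none
  | mark :: ms =>
    let pos := PySem.Chars.find s mark
    if pos = -1 then pvScanB s ms
    else
      let b := pos - 1
      let e := pos + (mark.length : Int)
      if b < 0 ∨ e > (s.length : Int) - 1 then pvScanB s ms
      else if ¬ pvOpeners.contains ((PySem.List.pyGet? s b).getD ' ')
          ∨ ¬ pvClosers.contains ((PySem.List.pyGet? s e).getD ' ') then
        some (.cut e)
      else
        some (.strip (PySem.List.slice s (some b) (some (e + 1))))

-- B's while-loop: acc is `result`; fuel = length + 1 is a totality guard only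
def pvGoB : Nat → List Char → List Char → List (List Char) → List Char
  | 0, acc, s, _ => acc ++ s
  | fuel + 1, acc, s, marks =>
    match pvScanB s marks with
    | none => acc ++ s
    | some (.cut e) =>
      pvGoB fuel (acc ++ PySem.List.slice s none (some e)) (PySem.List.slice s (some e) none) marks
    | some (.strip sub) => pvGoB fuel acc (PySem.Chars.replace s sub []) marks

def remove_marks_alt (filename : String) (marks : List String) : String :=
  String.ofList (pvGoB (filename.toList.length + 1) [] filename.toList (marks.map String.toList))

-- ===== PRECONDITION & SPEC =====
def Spec_remove_marks (filename : String) (marks : List String) (out : String) : Prop := out = remove_marks_alt filename marks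
instance (filename : String) (marks : List String) (out : String) : Decidable (Spec_remove_marks filename marks out) := by unfold Spec_remove_marks; infer_instance

-- ===== CLAIM (what is proved, stated in full; the proofs are below) =====
def Claim_equal_remove_marks : Prop := ∀ (filename : String) (marks : List String), Dom_remove_marks filename marks → Spec_remove_marks filename marks (remove_marks filename marks)

-- ===== LEMMAS AND PROOFS =====

-- A's for-loop body equals interpreting the action B's scan selects
theorem pvScanA_eq_scanB (fuel : Nat) (s : List Char) (marks : List (List Char)) :
    ∀ rest, pvScanA fuel s marks rest =
      match pvScanB s rest with
      | none => s
      | some (.cut e) =>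
          PySem.List.slice s none (some e) ++ pvGoA fuel (PySem.List.slice s (some e) none) marks
      | some (.strip sub) => pvGoA fuel (PySem.Chars.replace s sub []) marks := by
  intro rest
  induction rest with
  | nil => simp [pvScanA, pvScanB]
  | cons mark ms ih =>
    simp only [pvScanA, pvScanB]
    by_cases h1 : PySem.Chars.find s mark = -1
    · simp [h1, ih]
    · rw [if_pos h1, if_neg h1]
      by_cases h2 : PySem.Chars.find s mark - 1 ≥ 0 ∧
          PySem.Chars.find s mark + (mark.length : Int) ≤ (s.length : Int) - 1
      · rw [if_pos h2, if_neg (show ¬ (PySem.Chars.find s mark - 1 < 0 ∨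
            PySem.Chars.find s mark + (mark.length : Int) > (s.length : Int) - 1) by omega)]
        by_cases h3 : ¬ pvOpeners.contains
              ((PySem.List.pyGet? s (PySem.Chars.find s mark - 1)).getD ' ')
            ∨ ¬ pvClosers.contains
              ((PySem.List.pyGet? s (PySem.Chars.find s mark + (mark.length : Int))).getD ' ')
        · rw [if_pos h3, if_pos h3]
        · rw [if_neg h3, if_neg h3]
      · rw [if_neg h2, if_pos (show PySem.Chars.find s mark - 1 < 0 ∨
            PySem.Chars.find s mark + (mark.length : Int) > (s.length : Int) - 1 by omega), ih]

-- loop invariant: B's loop is A's recursion with the prefix accumulated in front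
theorem pvGoB_eq_goA (fuel : Nat) :
    ∀ (acc s : List Char) (marks : List (List Char)),
      pvGoB fuel acc s marks = acc ++ pvGoA fuel s marks := by
  induction fuel with
  | zero => intro acc s marks; simp [pvGoB, pvGoA]
  | succ fuel ih =>
    intro acc s marks
    rw [pvGoB, pvGoA, pvScanA_eq_scanB]
    cases h : pvScanB s marks with
    | none => simp
    | some a =>
      cases a with
      | cut e => simp [ih, List.append_assoc]
      | strip sub => simp [ih]

-- ===== VERDICT (by name: the statement is the Claim_ definition above) =====
theorem remove_marks_spec : Claim_equal_remove_marks := by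
  intro filename marks _
  unfold Spec_remove_marks remove_marks remove_marks_alt
  rw [pvGoB_eq_goA]
  simp
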